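-- pv_equiv track=rewrite | github.com/PardhuKadali/INNOMATICS_BATCH_225 | stringmethods.py | Istitle
-- ===== SOURCE A (Python) =====
-- def Istitle(word):
--     previous_char_is_space = True
--     is_title = False
--
--     for char in word:
--         if char != ' ':
--             if previous_char_is_space:
--                 if 'A' <= char <= 'Z':
--                     is_title = True
--                 else:
--                     is_title = False
--                     break
--                 previous_char_is_space = False
--         else:
--             previous_char_is_space = True
--     return is_title
-- ===== SOURCE B (Python) =====
-- def Istitle(word):
--     words = [w for w in word.split(' ') if w]
--     return bool(words) and all('A' <= w[0] <= 'Z' for w in words)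
-- ===== Notes on version B (the rewrite author's own statement) =====
-- stated objective: simpler
-- what changed: Replaced the character-by-character state machine (previous_char_is_space flag with break) by tokenize-then-check: split on the literal space, drop empty pieces, and test only each word's first character.
import Mathlib
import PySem

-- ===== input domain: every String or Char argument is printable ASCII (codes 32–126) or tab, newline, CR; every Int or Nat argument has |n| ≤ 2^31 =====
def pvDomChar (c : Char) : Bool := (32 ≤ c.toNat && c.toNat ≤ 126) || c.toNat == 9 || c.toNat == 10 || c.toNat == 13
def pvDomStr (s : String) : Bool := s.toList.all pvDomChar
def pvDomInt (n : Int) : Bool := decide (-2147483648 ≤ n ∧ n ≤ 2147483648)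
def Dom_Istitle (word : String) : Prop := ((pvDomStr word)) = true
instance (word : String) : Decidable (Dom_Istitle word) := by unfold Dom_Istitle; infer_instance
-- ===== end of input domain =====

-- B replaces A's character-by-character state machine with tokenize-then-check
-- (split on ' ', drop empties, test each word's first character); objective: simpler.

-- ===== PORT A =====
-- the for-loop with its two mutable flags; 'break' becomes the early return of false
def IstitleGo : List Char → Bool → Bool → Bool
  | [], _, isTitle => isTitle
  | c :: rest, prevSpace, isTitle =>
    if c ≠ ' ' then
      if prevSpace then
        if 'A' ≤ c ∧ c ≤ 'Z' then IstitleGo rest false true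
        else false
      else IstitleGo rest prevSpace isTitle
    else IstitleGo rest true isTitle

def Istitle (word : String) : Bool := IstitleGo word.toList true false

-- ===== PORT B =====
-- first character of a (nonempty-by-construction) word is an ASCII capital
def pvFirstUpper (w : List Char) : Bool :=
  match w with
  | c :: _ => decide ('A' ≤ c ∧ c ≤ 'Z')
  | [] => true   -- unreachable: empty pieces are filtered out

def Istitle_alt (word : String) : Bool :=
  let words := (word.toList.splitOn ' ').filter (fun w => w ≠ [])
  !words.isEmpty && words.all pvFirstUpper

-- ===== PRECONDITION & SPEC =====
def Spec_Istitle (word : String) (out : Bool) : Prop := out = Istitle_alt word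
instance (word : String) (out : Bool) : Decidable (Spec_Istitle word out) := by unfold Spec_Istitle; infer_instance

-- ===== CLAIM (what is proved, stated in full; the proofs are below) =====
def Claim_equal_Istitle : Prop := ∀ (word : String), Dom_Istitle word → Spec_Istitle word (Istitle word)

-- ===== LEMMAS AND PROOFS =====

-- the nonempty tokens of cs, as B computes them
def pvTokens (cs : List Char) : List (List Char) :=
  (cs.splitOn ' ').filter (fun w => w ≠ [])

-- the pieces after the first word (helper for the splitOn decomposition)
def pvRestSplit (l : List Char) : List (List Char) :=
  match l.dropWhile (fun d => d ≠ ' ') with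
  | [] => []
  | _ :: ds => ds.splitOn ' '

theorem pvRestSplit_cons (c : Char) (rest : List Char) (hc : c ≠ ' ') :
    pvRestSplit (c :: rest) = pvRestSplit rest := by
  unfold pvRestSplit
  rw [List.dropWhile_cons]
  simp [hc]

theorem splitOn_decomp (l : List Char) :
    l.splitOn ' ' = l.takeWhile (fun d => d ≠ ' ') :: pvRestSplit l := by
  induction l with
  | nil => simp [List.splitOn, pvRestSplit]
  | cons d ds ih =>
    by_cases hd : d = ' '
    · subst hd
      simp [List.splitOn, List.splitOnP_cons, pvRestSplit, List.takeWhile, List.dropWhile]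
    · rw [show (d :: ds).takeWhile (fun d => decide (d ≠ ' '))
            = d :: ds.takeWhile (fun d => decide (d ≠ ' ')) from by simp [hd],
          pvRestSplit_cons d ds hd,
          show (d :: ds).splitOn ' ' = (ds.splitOn ' ').modifyHead (d :: ·) from by
            simp [List.splitOn, List.splitOnP_cons, hd],
          ih]
      rfl

theorem pvTokens_nil : pvTokens [] = [] := by simp [pvTokens]

theorem pvTokens_space (rest : List Char) : pvTokens (' ' :: rest) = pvTokens rest := by
  simp [pvTokens, List.splitOn, List.splitOnP_cons]

theorem filter_pvRestSplit (l : List Char) :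
    (pvRestSplit l).filter (fun w => w ≠ []) = pvTokens (l.dropWhile (fun d => d ≠ ' ')) := by
  unfold pvRestSplit
  cases hdd : l.dropWhile (fun d => decide (d ≠ ' ')) with
  | nil => simp [pvTokens]
  | cons e es =>
    have he : e = ' ' := by
      have hne : l.dropWhile (fun d => decide (d ≠ ' ')) ≠ [] := by
        rw [hdd]; exact List.cons_ne_nil _ _
      have := List.head_dropWhile_not (fun d => decide (d ≠ ' ')) hne
      simp only [hdd, List.head_cons] at this
      simpa using this
    subst he
    rw [pvTokens_space]
    simp [pvTokens]

theorem pvTokens_cons (c : Char) (rest : List Char) (hc : c ≠ ' ') :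
    pvTokens (c :: rest) =
      (c :: rest.takeWhile (fun d => d ≠ ' ')) :: pvTokens (rest.dropWhile (fun d => d ≠ ' ')) := by
  rw [pvTokens, splitOn_decomp]
  have h2 : (c :: rest).takeWhile (fun d => decide (d ≠ ' '))
      = c :: rest.takeWhile (fun d => decide (d ≠ ' ')) := by simp [hc]
  rw [h2, List.filter_cons_of_pos (by simp), pvRestSplit_cons c rest hc, filter_pvRestSplit]

-- skipping the interior of the current word: prevSpace = false ignores chars until a space
theorem IstitleGo_false (cs : List Char) (b : Bool) :
    IstitleGo cs false b = IstitleGo (cs.dropWhile (fun d => d ≠ ' ')) false b := by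
  induction cs with
  | nil => rfl
  | cons c rest ih =>
    by_cases hc : c = ' '
    · subst hc; simp [List.dropWhile]
    · simpa [IstitleGo, hc, List.dropWhile] using ih

-- main invariant for the prevSpace = true state, by strong induction on the length
theorem IstitleGo_true_aux (n : Nat) : ∀ (cs : List Char), cs.length ≤ n → ∀ (b : Bool),
    IstitleGo cs true b =
      (if pvTokens cs = [] then b else (pvTokens cs).all pvFirstUpper) := by
  induction n with
  | zero =>
    intro cs hcs b
    interval_cases h : cs.length
    · rw [List.length_eq_zero_iff] at h; subst h; simp [IstitleGo, pvTokens_nil]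
  | succ n ih =>
    intro cs hcs b
    match cs with
    | [] => simp [IstitleGo, pvTokens_nil]
    | c :: rest =>
      by_cases hc : c = ' '
      · subst hc
        rw [show IstitleGo (' ' :: rest) true b = IstitleGo rest true b from by simp [IstitleGo],
          ih rest (by simpa using Nat.lt_succ_iff.mp (by simpa using hcs)), pvTokens_space]
      · have hup : IstitleGo (c :: rest) true b =
            if 'A' ≤ c ∧ c ≤ 'Z' then IstitleGo rest false true else false := by
          simp [IstitleGo, hc]
        rw [hup, pvTokens_cons c rest hc]
        by_cases hcz : 'A' ≤ c ∧ c ≤ 'Z'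
        · rw [if_pos hcz, IstitleGo_false]
          cases hdd : rest.dropWhile (fun d => d ≠ ' ') with
          | nil =>
            simp [IstitleGo, pvTokens_nil, pvFirstUpper, hcz]
          | cons d ds =>
            have hd : d = ' ' := by
              have hne : rest.dropWhile (fun d => decide (d ≠ ' ')) ≠ [] := by
                rw [hdd]; exact List.cons_ne_nil _ _
              have := List.head_dropWhile_not (fun d => decide (d ≠ ' ')) hne
              simp only [hdd, List.head_cons] at this
              simpa using this
            subst hd
            have hds : ds.length ≤ n := by
              have h1 : (' ' :: ds).length ≤ rest.length := hdd ▸ List.length_dropWhile_le _ _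
              simp at h1 hcs; omega
            rw [show IstitleGo (' ' :: ds) false true = IstitleGo ds true true from by
                simp [IstitleGo],
              ih ds hds, pvTokens_space]
            by_cases ht : pvTokens ds = []
            · simp [ht, pvFirstUpper, hcz]
            · simp [ht, pvFirstUpper, hcz]
        · rw [if_neg hcz]
          simp [pvFirstUpper, hcz]

-- ===== VERDICT (by name: the statement is the Claim_ definition above) =====
theorem Istitle_spec : Claim_equal_Istitle := by
  intro word _
  unfold Spec_Istitle Istitle Istitle_alt
  rw [IstitleGo_true_aux word.toList.length word.toList le_rfl]
  show _ = ((!(pvTokens word.toList).isEmpty) && (pvTokens word.toList).all pvFirstUpper)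
  by_cases h : pvTokens word.toList = []
  · simp [h]
  · simp [h]
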